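-- pv_equiv track=rewrite | github.com/lst016/psd-smart-cut | skills/psd-parser/level9-integration/pipeline.py | _component_bbox
-- ===== SOURCE A (Python) =====
-- from typing import Any, Dict, List, Optional, Tuple
--
-- def _union_bbox(boxes: List[Tuple[int, int, int, int]]) -> Optional[Tuple[int, int, int, int]]:
--     if not boxes:
--         return None
--     return (
--         min(box[0] for box in boxes),
--         min(box[1] for box in boxes),
--         max(box[2] for box in boxes),
--         max(box[3] for box in boxes),
--     )
--
-- def _component_bbox(
--     export_layer_ids: List[str],
--     record: Dict[str, Any],
--     psd_records: Dict[str, Dict[str, Any]],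
-- ) -> Tuple[int, int, int, int]:
--     boxes = [
--         psd_records[layer_id]["bbox"]
--         for layer_id in export_layer_ids
--         if layer_id in psd_records and psd_records[layer_id].get("bbox")
--     ]
--     merged = _union_bbox(boxes)
--     if merged:
--         return merged
--     if record.get("bbox"):
--         return record["bbox"]
--     return (0, 0, 0, 0)
-- ===== SOURCE B (Python) =====
-- def _component_bbox(export_layer_ids, record, psd_records):
--     acc = None
--     for layer_id in export_layer_ids:
--         rec = psd_records.get(layer_id)
--         if rec is None:
--             continue
--         b = rec.get("bbox")
--         if not b:
--             continue
--         if acc is None: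
--             acc = b
--         else:
--             acc = (min(acc[0], b[0]), min(acc[1], b[1]),
--                    max(acc[2], b[2]), max(acc[3], b[3]))
--     if acc is not None:
--         return acc
--     fb = record.get("bbox")
--     return fb if fb else (0, 0, 0, 0)
-- ===== Notes on version B (the rewrite author's own statement) =====
-- stated objective: simpler
-- what changed: Replaced the build-a-list-of-boxes-then-four-min/max-comprehensions (plus the _union_bbox helper) with a single pass over export_layer_ids that maintains one running union bbox accumulator.
import Mathlib
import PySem

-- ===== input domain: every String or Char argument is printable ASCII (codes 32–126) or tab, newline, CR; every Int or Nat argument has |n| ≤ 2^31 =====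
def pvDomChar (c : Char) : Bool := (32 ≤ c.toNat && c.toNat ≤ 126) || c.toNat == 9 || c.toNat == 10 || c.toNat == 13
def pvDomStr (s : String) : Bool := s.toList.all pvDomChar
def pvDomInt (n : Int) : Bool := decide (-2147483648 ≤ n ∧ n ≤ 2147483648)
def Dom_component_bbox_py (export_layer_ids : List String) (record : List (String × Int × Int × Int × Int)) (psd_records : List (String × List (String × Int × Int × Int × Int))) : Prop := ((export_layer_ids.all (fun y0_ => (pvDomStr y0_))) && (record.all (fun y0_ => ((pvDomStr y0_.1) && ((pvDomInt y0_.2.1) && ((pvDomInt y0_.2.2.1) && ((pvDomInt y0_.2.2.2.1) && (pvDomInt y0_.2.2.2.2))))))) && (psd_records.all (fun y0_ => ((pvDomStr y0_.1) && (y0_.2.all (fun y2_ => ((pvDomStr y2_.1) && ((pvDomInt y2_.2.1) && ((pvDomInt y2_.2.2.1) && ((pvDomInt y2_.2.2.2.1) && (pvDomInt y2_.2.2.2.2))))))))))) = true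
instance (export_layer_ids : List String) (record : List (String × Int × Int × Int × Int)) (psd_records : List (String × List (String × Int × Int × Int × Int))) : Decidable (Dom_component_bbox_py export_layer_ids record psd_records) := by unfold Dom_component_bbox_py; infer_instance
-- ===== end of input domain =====

-- One honest line: B replaces A's build-a-box-list + four min/max comprehensions (helper _union_bbox)
-- with a single pass keeping one running union-bbox accumulator — same result, simpler decomposition.

-- ===== PORT A =====
-- port of _union_bbox: Python's min/max over a nonempty generator (PySem.List.min?/max?, identity key);
-- a 4-tuple is always truthy in Python, so 'if merged' = the option being some.
def unionBbox (boxes : List (Int × Int × Int × Int)) : Option (Int × Int × Int × Int) :=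
  if boxes = [] then none
  else
    match PySem.List.min? (boxes.map (·.1)) (fun y => y),
          PySem.List.min? (boxes.map (·.2.1)) (fun y => y),
          PySem.List.max? (boxes.map (·.2.2.1)) (fun y => y),
          PySem.List.max? (boxes.map (·.2.2.2)) (fun y => y) with
    | some a, some b, some c, some d => some (a, b, c, d)
    | _, _, _, _ => none

-- the comprehension: keep psd_records[layer_id]["bbox"] when layer_id ∈ psd_records and it has a
-- (necessarily truthy: it is a 4-tuple) "bbox" entry; filterMap is exactly that filter+map.
def component_bbox_py (export_layer_ids : List String) (record : List (String × Int × Int × Int × Int)) (psd_records : List (String × List (String × Int × Int × Int × Int))) : Int × Int × Int × Int :=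
  let boxes := export_layer_ids.filterMap (fun lid =>
    match (PySem.Dict.mk psd_records).get? lid with
    | some r => (PySem.Dict.mk r).get? "bbox"
    | none => none)
  match unionBbox boxes with
  | some m => m
  | none =>
    match (PySem.Dict.mk record).get? "bbox" with
    | some b => b
    | none => (0, 0, 0, 0)

-- ===== PORT B =====
def bjoin (acc : Option (Int × Int × Int × Int)) (b : Int × Int × Int × Int) : Option (Int × Int × Int × Int) :=
  match acc with
  | none => some b
  | some a => some (min a.1 b.1, min a.2.1 b.2.1, max a.2.2.1 b.2.2.1, max a.2.2.2 b.2.2.2)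

def component_bbox_py_alt (export_layer_ids : List String) (record : List (String × Int × Int × Int × Int)) (psd_records : List (String × List (String × Int × Int × Int × Int))) : Int × Int × Int × Int :=
  let acc := export_layer_ids.foldl (fun acc lid =>
    match (PySem.Dict.mk psd_records).get? lid with
    | none => acc
    | some r =>
      match (PySem.Dict.mk r).get? "bbox" with
      | none => acc
      | some b => bjoin acc b) none
  match acc with
  | some a => a
  | none =>
    match (PySem.Dict.mk record).get? "bbox" with
    | some b => b
    | none => (0, 0, 0, 0)

-- ===== PRECONDITION & SPEC =====
def Spec_component_bbox_py (export_layer_ids : List String) (record : List (String × Int × Int × Int × Int)) (psd_records : List (String × List (String × Int × Int × Int × Int))) (out : Int × Int × Int × Int) : Prop := out = component_bbox_py_alt export_layer_ids record psd_records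
instance (export_layer_ids : List String) (record : List (String × Int × Int × Int × Int)) (psd_records : List (String × List (String × Int × Int × Int × Int))) (out : Int × Int × Int × Int) : Decidable (Spec_component_bbox_py export_layer_ids record psd_records out) := by unfold Spec_component_bbox_py; infer_instance

-- ===== CLAIM (what is proved, stated in full; the proofs are below) =====
def Claim_equal_component_bbox_py : Prop := ∀ (export_layer_ids : List String) (record : List (String × Int × Int × Int × Int)) (psd_records : List (String × List (String × Int × Int × Int × Int))), Dom_component_bbox_py export_layer_ids record psd_records → Spec_component_bbox_py export_layer_ids record psd_records (component_bbox_py export_layer_ids record psd_records)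

-- ===== LEMMAS AND PROOFS =====

-- B's single loop equals folding bjoin over the filtered box list A builds.
theorem foldl_filterMap_step (psd_records : List (String × List (String × Int × Int × Int × Int)))
    (ids : List String) (acc : Option (Int × Int × Int × Int)) :
    ids.foldl (fun acc lid =>
        match (PySem.Dict.mk psd_records).get? lid with
        | none => acc
        | some r =>
          match (PySem.Dict.mk r).get? "bbox" with
          | none => acc
          | some b => bjoin acc b) acc
      = (ids.filterMap (fun lid =>
          match (PySem.Dict.mk psd_records).get? lid with
          | some r => (PySem.Dict.mk r).get? "bbox"
          | none => none)).foldl bjoin acc := by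
  induction ids generalizing acc with
  | nil => rfl
  | cons hd tl ih =>
    simp only [List.foldl, List.filterMap_cons]
    cases h1 : (PySem.Dict.mk psd_records).get? hd with
    | none => simpa [h1] using ih acc
    | some r =>
      cases h2 : (PySem.Dict.mk r).get? "bbox" with
      | none => simpa [h1, h2] using ih acc
      | some b => simpa [h1, h2] using ih (bjoin acc b)

theorem foldl_bjoin_some (rest : List (Int × Int × Int × Int)) (a : Int × Int × Int × Int) :
    rest.foldl bjoin (some a)
      = some ((rest.map (·.1)).foldl min a.1,
              (rest.map (·.2.1)).foldl min a.2.1,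
              (rest.map (·.2.2.1)).foldl max a.2.2.1,
              (rest.map (·.2.2.2)).foldl max a.2.2.2) := by
  induction rest generalizing a with
  | nil => rfl
  | cons x rest ih =>
    simp only [List.foldl, List.map, bjoin]
    exact ih _

theorem foldl_bjoin_eq_unionBbox (boxes : List (Int × Int × Int × Int)) :
    boxes.foldl bjoin none = unionBbox boxes := by
  cases boxes with
  | nil => rfl
  | cons b rest =>
    simp only [List.foldl, bjoin, unionBbox, List.map,
      PySem.List.min?_id_cons, PySem.List.max?_id_cons]
    exact foldl_bjoin_some rest b

-- ===== VERDICT (by name: the statement is the Claim_ definition above) =====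
theorem component_bbox_py_spec : Claim_equal_component_bbox_py := by
  intro ids record psd _
  unfold Spec_component_bbox_py component_bbox_py component_bbox_py_alt
  rw [foldl_filterMap_step, foldl_bjoin_eq_unionBbox]
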